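-- pv_equiv track=rewrite | github.com/MarlonTri/smith-calc | smith.py | digcalc2
-- ===== SOURCE A (Python) =====
-- import math
--
-- def dig_sum(n):
--     return sum([ord(x)-48 for x in str(n)])
--
-- def digcalc2(c,n,e):
--     cap = 10**n
--     tot = 0
--
--     for e2 in range(e + 1):
--         s = (c ** e2) * math.comb(e,e2)
--         if not s < cap:
--             return
--         tot += dig_sum(s)
--     return tot
-- ===== SOURCE B (Python) =====
-- import math
--
-- def dig_sum(n):
--     s = 0
--     n = abs(n)
--     while n > 0:
--         s += n % 10
--         n //= 10
--     return s
--
-- def digcalc2(c, n, e):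
--     cap = 10 ** n
--     if any((c ** e2) * math.comb(e, e2) >= cap for e2 in range(e + 1)):
--         return None
--     return sum(dig_sum((c ** e2) * math.comb(e, e2)) for e2 in range(e + 1))
-- ===== Notes on version B (the rewrite author's own statement) =====
-- stated objective: alternative
-- what changed: The single interleaved guard-and-accumulate loop is split into a short-circuiting any() cap-check pass plus a separate sum() pass over the terms, and the str()-based dig_sum is replaced by an arithmetic %10 //10 loop over the absolute value.
-- intended difference: When c < 0, e >= 1, n >= 0 and every term c**e2*comb(e,e2) stays below 10**n, A's str-based dig_sum counts each negative term's leading '-' as ord('-')-48 = -3 and A returns a total lowered by 3 per negative term (e.g. -1 for c=-1,n=1,e=1), while B returns the true sum of digit sums of the terms' magnitudes (2 there), which is the intended digit-sum total. — e.g. on digcalc2(-1, 1, 1): A returns some (-1), B returns some 2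
import Mathlib
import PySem

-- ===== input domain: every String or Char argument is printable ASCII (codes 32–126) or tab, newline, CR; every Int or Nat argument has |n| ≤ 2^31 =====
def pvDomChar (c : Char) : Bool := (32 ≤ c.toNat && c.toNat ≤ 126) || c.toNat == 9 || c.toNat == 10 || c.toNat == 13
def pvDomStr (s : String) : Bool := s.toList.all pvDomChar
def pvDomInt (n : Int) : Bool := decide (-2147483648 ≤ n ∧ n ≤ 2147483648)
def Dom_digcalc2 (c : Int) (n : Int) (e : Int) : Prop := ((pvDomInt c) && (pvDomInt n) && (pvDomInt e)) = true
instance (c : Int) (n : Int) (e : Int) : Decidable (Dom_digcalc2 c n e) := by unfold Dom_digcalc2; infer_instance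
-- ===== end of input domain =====

-- B splits A's interleaved guard-and-accumulate loop into a short-circuiting any() cap-check pass
-- plus a separate sum() pass, with an arithmetic digit sum over absolute values instead of str();
-- on negative c it intentionally differs from A (see D_digcalc2): A's dig_sum counts '-' as -3.


-- ===== PORT A =====

-- math.comb via the multiplicative formula (exact: each intermediate product is divisible);
-- both Pythons call the math.comb library routine, both ports call this
def pyMathComb (n k : Nat) : Nat :=
  (List.range k).foldl (fun acc i => acc * (n - i) / (i + 1)) 1

-- str(n)-based digit sum of A: sum([ord(x)-48 for x in str(n)])
def aDigSum (s : Int) : Int :=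
  ((PySem.Int.toStr s).toList.map (fun x => (x.toNat : Int) - 48)).sum

-- 's < cap' with cap = 10**n.  For n ≥ 0 this is the exact integer comparison.  For n < 0
-- Python's cap is a float in [0.0, 0.1]; the only value A ever compares against it is the
-- e2 = 0 term s = 1 (the comparison fails and A returns None), and there 'decide (s ≤ 0)'
-- is exact.
def aCapLt (s : Int) (n : Int) : Bool :=
  if 0 ≤ n then decide (s < 10 ^ n.toNat) else decide (s ≤ 0)

-- the for-loop of A over range(e+1), e2 counting up, k counting remaining iterations;
-- early-returns none when a term reaches the cap
def aLoop (c : Int) (e : Int) (n : Int) : Nat → Int → Int → Option Int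
  | 0, _, tot => some tot
  | k + 1, e2, tot =>
    let s := c ^ e2.toNat * (pyMathComb e.toNat e2.toNat : Int)
    if !aCapLt s n then none
    else aLoop c e n k (e2 + 1) (tot + aDigSum s)

def digcalc2 (c : Int) (n : Int) (e : Int) : Option Int :=
  aLoop c e n (e + 1).toNat 0 0

-- ===== PORT B =====

-- the while-loop of Source B's dig_sum: while n > 0: s += n % 10; n //= 10
def bDigLoop (n : Nat) (s : Nat) : Nat :=
  if 0 < n then bDigLoop (n / 10) (s + n % 10) else s
termination_by n
decreasing_by exact Nat.div_lt_self (by omega) (by omega)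

-- Source B's dig_sum: arithmetic digit sum of abs(n)
def bDigSum (t : Int) : Int := (bDigLoop t.natAbs 0 : Int)

-- 't >= cap' with cap = 10**n; same float note as on the A side: for n < 0 the only value
-- compared is the first term t = 1 (any() short-circuits there), where 'decide (1 ≤ t)' is exact
def bCapGe (t : Int) (n : Int) : Bool :=
  if 0 ≤ n then decide (10 ^ n.toNat ≤ t) else decide (1 ≤ t)

-- Source B's short-circuiting any() pass over the term generator (k terms remaining, e2 counting up)
def bAnyHit (c : Int) (e : Int) (n : Int) : Nat → Nat → Bool
  | 0, _ => false
  | k + 1, e2 =>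
    bCapGe (c ^ e2 * (pyMathComb e.toNat e2 : Int)) n || bAnyHit c e n k (e2 + 1)

-- Source B's sum() pass over the dig_sum generator
def bSumLoop (c : Int) (e : Int) : Nat → Nat → Int
  | 0, _ => 0
  | k + 1, e2 =>
    bDigSum (c ^ e2 * (pyMathComb e.toNat e2 : Int)) + bSumLoop c e k (e2 + 1)

def digcalc2_alt (c : Int) (n : Int) (e : Int) : Option Int :=
  if bAnyHit c e n (e + 1).toNat 0 then none
  else some (bSumLoop c e (e + 1).toNat 0)

-- ===== PRECONDITION & SPEC =====

-- On inputs with c < 0, e ≥ 1, n ≥ 0 whose terms all stay below 10**n, A's str-based dig_sum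
-- counts each negative term's leading '-' as ord('-')-48 = -3 and A returns a total lowered by 3
-- per negative term, while B returns the sum of the digit sums of the terms' magnitudes, the
-- intended digit-sum total.
-- decision helper for D_digcalc2: scans e2 = j, j+1, … (k terms), short-circuiting at the first
-- term at or above cap; binomial coefficients via descFactorial/factorial (= Nat.choose)
def dAllBelow (c : Int) (cap : Int) (en : Nat) : Nat → Nat → Bool
  | 0, _ => true
  | k + 1, e2 =>
    decide (c ^ e2 * ((en.descFactorial e2 / e2.factorial : Nat) : Int) < cap)
      && dAllBelow c cap en k (e2 + 1)

def D_digcalc2 (c : Int) (n : Int) (e : Int) : Prop :=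
  c < 0 ∧ 1 ≤ e ∧ 0 ≤ n ∧ dAllBelow c (10 ^ n.toNat) e.toNat (e + 1).toNat 0 = true
instance (c : Int) (n : Int) (e : Int) : Decidable (D_digcalc2 c n e) := by
  unfold D_digcalc2; infer_instance

def Spec_digcalc2 (c : Int) (n : Int) (e : Int) (out : Option Int) : Prop :=
  ¬ D_digcalc2 c n e → out = digcalc2_alt c n e
instance (c : Int) (n : Int) (e : Int) (out : Option Int) : Decidable (Spec_digcalc2 c n e out) := by unfold Spec_digcalc2; infer_instance

def pvDiffWitness_digcalc2 : Int × Int × Int := (-1, 1, 1)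
def pvDiffWitnessOut_digcalc2 : (Option Int) × (Option Int) := (some (-1), some 2)

-- ===== CLAIM (what is proved, stated in full; the proofs are below) =====
def Claim_unchanged_digcalc2 : Prop := ∀ (c : Int) (n : Int) (e : Int), Dom_digcalc2 c n e → Spec_digcalc2 c n e (digcalc2 c n e)
def Claim_changed_digcalc2 : Prop := Dom_digcalc2 (pvDiffWitness_digcalc2.1) (pvDiffWitness_digcalc2.2.1) (pvDiffWitness_digcalc2.2.2) ∧ D_digcalc2 (pvDiffWitness_digcalc2.1) (pvDiffWitness_digcalc2.2.1) (pvDiffWitness_digcalc2.2.2) ∧ digcalc2 (pvDiffWitness_digcalc2.1) (pvDiffWitness_digcalc2.2.1) (pvDiffWitness_digcalc2.2.2) = pvDiffWitnessOut_digcalc2.1 ∧ digcalc2_alt (pvDiffWitness_digcalc2.1) (pvDiffWitness_digcalc2.2.1) (pvDiffWitness_digcalc2.2.2) = pvDiffWitnessOut_digcalc2.2 ∧ pvDiffWitnessOut_digcalc2.1 ≠ pvDiffWitnessOut_digcalc2.2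
def Claim_exact_digcalc2 : Prop := ∀ (c : Int) (n : Int) (e : Int), Dom_digcalc2 c n e → D_digcalc2 c n e → digcalc2 c n e ≠ digcalc2_alt c n e

-- ===== LEMMAS AND PROOFS =====

lemma pyMathComb_eq (n k : Nat) : pyMathComb n k = n.choose k := by
  unfold pyMathComb
  induction k with
  | zero => simp
  | succ k ih =>
    rw [List.range_succ, List.foldl_append, ih]
    show n.choose k * (n - k) / (k + 1) = n.choose (k + 1)
    rw [← Nat.choose_succ_right_eq, Nat.mul_comm]
    exact Nat.mul_div_cancel_left _ (Nat.succ_pos k)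

lemma dAllBelow_iff (c cap : Int) (en : Nat) : ∀ (k j : Nat),
    (dAllBelow c cap en k j = true
      ↔ ∀ i ∈ List.range k, c ^ (j + i) * ((en.choose (j + i) : Nat) : Int) < cap) := by
  intro k
  induction k with
  | zero => intro j; simp [dAllBelow]
  | succ k ih =>
    intro j
    rw [dAllBelow, Bool.and_eq_true, decide_eq_true_eq, ih (j + 1),
      ← Nat.choose_eq_descFactorial_div_factorial, List.range_succ_eq_map]
    constructor
    · rintro ⟨h0, hrest⟩ i hi
      rcases List.mem_cons.mp hi with rfl | hi'
      · simpa using h0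
      · obtain ⟨i', hi'', rfl⟩ := List.mem_map.mp hi'
        have := hrest i' hi''
        have harith : j + 1 + i' = j + (i' + 1) := by omega
        rwa [harith] at this
    · intro h
      refine ⟨by simpa using h 0 (List.mem_cons_self), fun i hi => ?_⟩
      have := h (i + 1) (List.mem_cons.mpr (Or.inr (List.mem_map.mpr ⟨i, hi, rfl⟩)))
      have harith : j + (i + 1) = j + 1 + i := by omega
      rwa [harith] at this

lemma dAllBelow_zero (c cap : Int) (en k : Nat) :
    (dAllBelow c cap en k 0 = true
      ↔ ∀ e2 ∈ List.range k, c ^ e2 * ((en.choose e2 : Nat) : Int) < cap) := by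
  rw [dAllBelow_iff]
  simp

-- recursive digit sum, the common reference for both digit-sum implementations
def sdig (n : Nat) : Nat :=
  if n < 10 then n else sdig (n / 10) + n % 10
termination_by n
decreasing_by exact Nat.div_lt_self (by omega) (by omega)

lemma digitChar_toNat {d : Nat} (h : d < 10) : (Nat.digitChar d).toNat = 48 + d := by
  interval_cases d <;> rfl

lemma toDigitsCore_charsum (fuel : Nat) :
    ∀ (m : Nat) (ds : List Char), m < 10 ^ fuel →
      ((Nat.toDigitsCore 10 fuel m ds).map (fun x => (x.toNat : Int) - 48)).sum
        = (sdig m : Int) + ((ds.map (fun x => (x.toNat : Int) - 48)).sum) := by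
  induction fuel with
  | zero =>
    intro m ds hm
    have : m = 0 := by simpa using hm
    subst this
    simp [Nat.toDigitsCore, sdig]
  | succ fuel ih =>
    intro m ds hm
    rw [Nat.toDigitsCore]
    by_cases h0 : m / 10 = 0
    · have hlt : m < 10 := by omega
      rw [if_pos h0, sdig, if_pos hlt]
      simp only [List.map_cons, List.sum_cons]
      rw [digitChar_toNat (Nat.mod_lt m (by omega)), Nat.mod_eq_of_lt hlt]
      push_cast
      ring
    · have hfuel : m / 10 < 10 ^ fuel := by rw [pow_succ] at hm; omega
      rw [if_neg h0, sdig, if_neg (by omega), ih (m / 10) _ hfuel]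
      simp only [List.map_cons, List.sum_cons]
      rw [digitChar_toNat (Nat.mod_lt m (by omega))]
      push_cast
      ring

lemma toDigits_charsum (m : Nat) :
    ((Nat.toDigits 10 m).map (fun x => (x.toNat : Int) - 48)).sum = (sdig m : Int) := by
  have := toDigitsCore_charsum (m + 1) m [] (by
    calc m < m + 1 := Nat.lt_succ_self m
    _ ≤ 10 ^ (m + 1) := Nat.le_of_lt (Nat.lt_pow_self (by omega)))
  simpa [Nat.toDigits] using this

lemma bDigLoop_eq (n : Nat) : ∀ s, bDigLoop n s = s + sdig n := by
  induction n using Nat.strong_induction_on with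
  | _ n ih =>
    intro s
    rw [bDigLoop, sdig]
    by_cases h : 0 < n
    · rw [if_pos h]
      by_cases h10 : n < 10
      · rw [bDigLoop, if_neg (by omega), if_pos h10]
        omega
      · rw [if_neg h10, ih (n / 10) (Nat.div_lt_self (by omega) (by omega))]
        omega
    · rw [if_neg h, if_pos (by omega)]
      omega

lemma bDigSum_eq (t : Int) : bDigSum t = (sdig t.natAbs : Int) := by
  unfold bDigSum
  rw [bDigLoop_eq]
  simp

lemma aDigSum_cases (m : Int) :
    aDigSum m = (sdig m.natAbs : Int) + (if m < 0 then -3 else 0) := by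
  unfold aDigSum
  rw [PySem.Int.toList_toStr]
  unfold PySem.Int.toChars
  by_cases h : m < 0
  · rw [if_pos h, if_pos h]
    simp only [List.map_cons, List.sum_cons]
    rw [toDigits_charsum]
    have h45 : (('-'.toNat : Int) - 48) = -3 := by decide
    rw [h45]
    ring
  · rw [if_neg h, toDigits_charsum, if_neg h]
    have hmn : m.toNat = m.natAbs := by omega
    rw [hmn]
    ring

lemma digsum_eq_of_nonneg {t : Int} (h : 0 ≤ t) : aDigSum t = bDigSum t := by
  rw [aDigSum_cases, bDigSum_eq, if_neg (by omega)]
  ring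

lemma digsum_lt_of_neg {t : Int} (h : t < 0) : aDigSum t < bDigSum t := by
  rw [aDigSum_cases, bDigSum_eq, if_pos h]
  omega

lemma hit_eq (t n : Int) : (!aCapLt t n) = bCapGe t n := by
  unfold aCapLt bCapGe
  split_ifs <;> rw [← decide_not] <;> exact decide_eq_decide.mpr (by omega)

-- A's loop re-expressed over the explicit list of the terms it visits
def aOnList (n : Int) : List Int → Int → Option Int
  | [], tot => some tot
  | t :: ts, tot => if !aCapLt t n then none else aOnList n ts (tot + aDigSum t)

lemma aLoop_eq_onList (c e n : Int) (k : Nat) : ∀ (j : Nat) (tot : Int),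
    aLoop c e n k (j : Int) tot
      = aOnList n ((List.range k).map
          (fun i => c ^ (j + i) * (pyMathComb e.toNat (j + i) : Int))) tot := by
  induction k with
  | zero => intro j tot; simp [aLoop, aOnList]
  | succ k ih =>
    intro j tot
    rw [List.range_succ_eq_map, List.map_cons, List.map_map]
    show aLoop c e n (k + 1) (j : Int) tot = aOnList n (_ :: _) tot
    rw [aLoop, aOnList]
    have hj : ((j : Int)).toNat = j := Int.toNat_natCast j
    simp only [hj, Nat.add_zero]
    congr 1
    have hcast : (j : Int) + 1 = ((j + 1 : Nat) : Int) := by push_cast; ring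
    rw [hcast, ih (j + 1)]
    congr 1
    apply List.map_congr_left
    intro i _
    have : j + (i + 1) = j + 1 + i := by omega
    simp [Function.comp, this]

-- the term list, proof-side common reference for both loops
def termsOf (c : Int) (e : Int) : List Int :=
  (List.range (e + 1).toNat).map (fun e2 => c ^ e2 * (pyMathComb e.toNat e2 : Int))

lemma digcalc2_eq_onList (c n e : Int) :
    digcalc2 c n e = aOnList n (termsOf c e) 0 := by
  unfold digcalc2 termsOf
  have := aLoop_eq_onList c e n (e + 1).toNat 0 0
  simpa using this

lemma bAnyHit_eq (c e n : Int) : ∀ (k : Nat), ∀ (j : Nat),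
    bAnyHit c e n k j
      = ((List.range k).map (fun i => c ^ (j + i) * (pyMathComb e.toNat (j + i) : Int))).any
          (fun t => bCapGe t n) := by
  intro k
  induction k with
  | zero => intro j; simp [bAnyHit]
  | succ k ih =>
    intro j
    rw [List.range_succ_eq_map, List.map_cons, List.map_map, List.any_cons]
    rw [bAnyHit, ih (j + 1)]
    simp only [Nat.add_zero]
    congr 2
    apply List.map_congr_left
    intro i _
    have harith : j + (i + 1) = j + 1 + i := by omega
    simp [Function.comp, harith]

lemma bSumLoop_eq (c e : Int) : ∀ (k : Nat), ∀ (j : Nat),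
    bSumLoop c e k j
      = (((List.range k).map (fun i => c ^ (j + i) * (pyMathComb e.toNat (j + i) : Int))).map
          bDigSum).sum := by
  intro k
  induction k with
  | zero => intro j; simp [bSumLoop]
  | succ k ih =>
    intro j
    rw [List.range_succ_eq_map, List.map_cons, List.map_map, List.map_cons, List.sum_cons]
    rw [bSumLoop, ih (j + 1)]
    simp only [Nat.add_zero]
    congr 2
    rw [List.map_map, List.map_map]
    apply List.map_congr_left
    intro i _
    have harith : j + (i + 1) = j + 1 + i := by omega
    simp [Function.comp, harith]

lemma alt_eq_list (c n e : Int) :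
    digcalc2_alt c n e
      = if (termsOf c e).any (fun t => bCapGe t n) then none
        else some (((termsOf c e).map bDigSum).sum) := by
  unfold digcalc2_alt termsOf
  rw [bAnyHit_eq c e n _ 0, bSumLoop_eq c e _ 0]
  have hfun : (fun i => c ^ (0 + i) * (pyMathComb e.toNat (0 + i) : Int))
      = (fun e2 => c ^ e2 * (pyMathComb e.toNat e2 : Int)) := by
    funext i
    simp
  rw [hfun]

lemma onList_eq (n : Int) (ts : List Int) :
    ∀ tot : Int,
    ((ts.any (fun t => bCapGe t n)) = false → ∀ t ∈ ts, aDigSum t = bDigSum t) →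
    aOnList n ts tot
      = if ts.any (fun t => bCapGe t n) then none else some (tot + (ts.map bDigSum).sum) := by
  induction ts with
  | nil => intro tot _; simp [aOnList]
  | cons t ts ih =>
    intro tot h
    rw [aOnList, hit_eq]
    simp only [List.any_cons]
    by_cases hb : bCapGe t n = true
    · simp [hb]
    · have hb' : bCapGe t n = false := Bool.eq_false_iff.mpr hb
      simp only [hb', Bool.false_or, Bool.false_eq_true, if_false]
      have h' : ts.any (fun t => bCapGe t n) = false → ∀ x ∈ ts, aDigSum x = bDigSum x := by
        intro ha x hx
        exact h (by simp [hb', ha]) x (List.mem_cons_of_mem _ hx)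
      rw [ih (tot + aDigSum t) h']
      by_cases ha : ts.any (fun t => bCapGe t n) = true
      · simp [ha]
      · have ha' : ts.any (fun t => bCapGe t n) = false := Bool.eq_false_iff.mpr ha
        simp only [ha', Bool.false_eq_true, if_false]
        have ht : aDigSum t = bDigSum t := h (by simp [hb', ha']) t (List.mem_cons_self)
        rw [List.map_cons, List.sum_cons, ht]
        congr 1
        ring

lemma onList_nohit (n : Int) (ts : List Int) :
    ∀ tot : Int, ts.any (fun t => bCapGe t n) = false →
      aOnList n ts tot = some (tot + (ts.map aDigSum).sum) := by
  induction ts with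
  | nil => intro tot _; simp [aOnList]
  | cons t ts ih =>
    intro tot h
    simp only [List.any_cons, Bool.or_eq_false_iff] at h
    rw [aOnList, hit_eq, h.1]
    simp only [Bool.false_eq_true, if_false]
    rw [ih _ h.2, List.map_cons, List.sum_cons]
    congr 1
    ring

-- ===== VERDICT (by name: the statement is the Claim_ definition above) =====
theorem digcalc2_spec : Claim_unchanged_digcalc2 := by
  intro c n e _ hnd
  show digcalc2 c n e = digcalc2_alt c n e
  rw [digcalc2_eq_onList]
  have hkey : (termsOf c e).any (fun t => bCapGe t n) = false →
      ∀ t ∈ termsOf c e, aDigSum t = bDigSum t := by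
    intro hany t ht
    obtain ⟨e2, he2, rfl⟩ := List.mem_map.mp ht
    by_cases hn : 0 ≤ n
    · apply digsum_eq_of_nonneg
      by_cases hc : 0 ≤ c
      · exact mul_nonneg (pow_nonneg hc _) (Int.natCast_nonneg _)
      · by_cases he : 1 ≤ e
        · exfalso
          have hne : ¬ ∀ e2' ∈ List.range (e + 1).toNat,
              c ^ e2' * (e.toNat.choose e2' : Int) < 10 ^ n.toNat := by
            intro hall
            exact hnd ⟨by omega, he, hn, (dAllBelow_zero _ _ _ _).mpr hall⟩
          push Not at hne
          obtain ⟨e2', hmem, hge⟩ := hne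
          have hfalse := (List.any_eq_false.mp hany) _
            (List.mem_map.mpr ⟨e2', hmem, rfl⟩)
          rw [bCapGe, if_pos hn] at hfalse
          rw [pyMathComb_eq] at hfalse
          simp at hfalse
          omega
        · have he2' : e2 = 0 := by
            have := List.mem_range.mp he2
            omega
          subst he2'
          simp [pyMathComb]
    · push Not at hn
      exfalso
      have h0 : (0 : Nat) ∈ List.range (e + 1).toNat := by
        refine List.mem_range.mpr ?_
        have := List.mem_range.mp he2
        omega
      have hfalse := (List.any_eq_false.mp hany) _ (List.mem_map.mpr ⟨0, h0, rfl⟩)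
      rw [bCapGe, if_neg (by omega)] at hfalse
      simp [pyMathComb] at hfalse
  rw [onList_eq n (termsOf c e) 0 hkey, alt_eq_list]
  by_cases hany : (termsOf c e).any (fun t => bCapGe t n) = true
  · rw [if_pos hany, if_pos hany]
  · rw [if_neg hany, if_neg hany, zero_add]

theorem digcalc2_changed : Claim_changed_digcalc2 := by
  unfold Claim_changed_digcalc2
  refine ⟨by decide, by decide, by decide, ?_, by decide⟩
  show digcalc2_alt (-1) 1 1 = some 2
  have hs1 : sdig 1 = 1 := by rw [sdig]; norm_num
  have hb1 : bDigSum 1 = 1 := by rw [bDigSum_eq]; norm_num [hs1]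
  have hbn1 : bDigSum (-1) = 1 := by rw [bDigSum_eq]; norm_num [hs1]
  have hterms : termsOf (-1) 1 = [1, -1] := by decide
  have hhit : ([1, -1] : List Int).any (fun t => bCapGe t 1) = false := by decide
  rw [alt_eq_list]
  simp only [hterms, hhit, Bool.false_eq_true, if_false, List.map_cons,
    List.map_nil, List.sum_cons, List.sum_nil, hb1, hbn1]
  norm_num

theorem digcalc2_tight : Claim_exact_digcalc2 := by
  intro c n e _ hd
  obtain ⟨hc, he, hn, hallb⟩ := hd
  have hall := (dAllBelow_zero _ _ _ _).mp hallb
  have hany : (termsOf c e).any (fun t => bCapGe t n) = false := by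
    apply List.any_eq_false.mpr
    intro t ht
    obtain ⟨e2, he2, rfl⟩ := List.mem_map.mp ht
    rw [bCapGe, if_pos hn, pyMathComb_eq]
    simp only [decide_eq_true_eq]
    exact not_le.mpr (hall e2 he2)
  rw [digcalc2_eq_onList, onList_nohit n (termsOf c e) 0 hany, alt_eq_list, hany]
  simp only [Bool.false_eq_true, if_false]
  intro heq
  have hsum := Option.some.inj heq
  have hle : ∀ t ∈ termsOf c e, aDigSum t ≤ bDigSum t := by
    intro t _
    by_cases h : t < 0
    · exact le_of_lt (digsum_lt_of_neg h)
    · exact le_of_eq (digsum_eq_of_nonneg (by omega))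
  have hmem : (c ^ 1 * (pyMathComb e.toNat 1 : Int)) ∈ termsOf c e :=
    List.mem_map.mpr ⟨1, List.mem_range.mpr (by omega), rfl⟩
  have hneg : c ^ 1 * (pyMathComb e.toNat 1 : Int) < 0 := by
    rw [pow_one, pyMathComb_eq, Nat.choose_one_right]
    apply mul_neg_of_neg_of_pos hc
    exact_mod_cast Nat.pos_of_ne_zero (by omega)
  have hlt : ((termsOf c e).map aDigSum).sum < ((termsOf c e).map bDigSum).sum :=
    List.sum_lt_sum aDigSum bDigSum hle ⟨_, hmem, digsum_lt_of_neg hneg⟩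
  omega
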